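-- pv_equiv track=rewrite | github.com/cur1osus/sunobot | bot/utils/withdrawals.py | pick_manager_id
-- ===== SOURCE A (Python) =====
-- def pick_manager_id(
--     manager_ids: list[int],
--     loads: dict[int, int],
-- ) -> int | None:
--     if not manager_ids:
--         return None
--
--     min_load = min(loads.get(manager_id, 0) for manager_id in manager_ids)
--     for manager_id in manager_ids:
--         if loads.get(manager_id, 0) == min_load:
--             return manager_id
--     return manager_ids[0]
-- ===== SOURCE B (Python) =====
-- def pick_manager_id(
--     manager_ids: list[int],
--     loads: dict[int, int],
-- ) -> int | None:
--     if not manager_ids: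
--         return None
--     best_id = manager_ids[0]
--     best_load = loads.get(best_id, 0)
--     for mid in manager_ids[1:]:
--         load = loads.get(mid, 0)
--         if load < best_load:
--             best_id, best_load = mid, load
--     return best_id
-- ===== Notes on version B (the rewrite author's own statement) =====
-- stated objective: simpler
-- what changed: Replaces A's two passes (compute min load, then rescan for the first manager attaining it) by one pass keeping a running best-so-far (strict < keeps the first minimal manager).
import Mathlib
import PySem

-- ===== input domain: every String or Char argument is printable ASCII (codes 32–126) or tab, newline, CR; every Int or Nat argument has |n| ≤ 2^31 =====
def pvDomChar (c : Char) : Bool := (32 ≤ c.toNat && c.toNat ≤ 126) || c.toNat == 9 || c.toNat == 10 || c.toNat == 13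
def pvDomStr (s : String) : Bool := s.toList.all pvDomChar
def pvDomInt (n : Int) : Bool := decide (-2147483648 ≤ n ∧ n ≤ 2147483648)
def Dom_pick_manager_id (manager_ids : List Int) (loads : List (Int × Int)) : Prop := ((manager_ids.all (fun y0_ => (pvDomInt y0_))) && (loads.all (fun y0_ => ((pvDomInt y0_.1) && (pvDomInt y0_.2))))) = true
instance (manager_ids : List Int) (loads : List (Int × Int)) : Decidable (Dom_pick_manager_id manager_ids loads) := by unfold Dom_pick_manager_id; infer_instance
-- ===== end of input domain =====

-- B: one pass keeping a running best-so-far instead of A's min pass + rescan; same return value.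
-- ===== PORT A =====
-- loads.get(mid, 0)
def pvLoad (loads : List (Int × Int)) (mid : Int) : Int := PySem.Dict.getD (PySem.Dict.mk loads) mid 0

def pick_manager_id (manager_ids : List Int) (loads : List (Int × Int)) : Option Int :=
  match manager_ids with
  | [] => none
  | m :: rest =>
    -- min(loads.get(mid, 0) for mid in manager_ids): min over a nonempty generator
    let min_load : Int := rest.foldl (fun a x => min a (pvLoad loads x)) (pvLoad loads m)
    -- for-loop returning the first manager whose load equals min_load
    match (m :: rest).find? (fun x => pvLoad loads x == min_load) with
    | some r => some r
    | none => some m   -- the trailing 'return manager_ids[0]' (unreachable in Python)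

-- ===== PORT B =====
def pick_manager_id_alt (manager_ids : List Int) (loads : List (Int × Int)) : Option Int :=
  match manager_ids with
  | [] => none
  | m :: rest =>
    let s := rest.foldl
      (fun (s : Int × Int) mid =>
        let load := pvLoad loads mid
        if load < s.2 then (mid, load) else s)
      (m, pvLoad loads m)
    some s.1

-- ===== PRECONDITION & SPEC =====
def Spec_pick_manager_id (manager_ids : List Int) (loads : List (Int × Int)) (out : Option Int) : Prop := out = pick_manager_id_alt manager_ids loads
instance (manager_ids : List Int) (loads : List (Int × Int)) (out : Option Int) : Decidable (Spec_pick_manager_id manager_ids loads out) := by unfold Spec_pick_manager_id; infer_instance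

-- ===== CLAIM (what is proved, stated in full; the proofs are below) =====
def Claim_equal_pick_manager_id : Prop := ∀ (manager_ids : List Int) (loads : List (Int × Int)), Dom_pick_manager_id manager_ids loads → Spec_pick_manager_id manager_ids loads (pick_manager_id manager_ids loads)

-- ===== LEMMAS AND PROOFS =====

-- The second component of B's fold is the running minimum of the loads seen so far.
theorem fold_snd_eq_min (f : Int → Int) (rest : List Int) (m v : Int) :
    (rest.foldl (fun (s : Int × Int) x => if f x < s.2 then (x, f x) else s) (m, v)).2
      = rest.foldl (fun a x => min a (f x)) v := by
  induction rest generalizing m v with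
  | nil => rfl
  | cons x xs ih =>
    simp only [List.foldl_cons]
    by_cases h : f x < v
    · rw [if_pos h, ih, min_eq_right (le_of_lt h)]
    · rw [if_neg h, ih, min_eq_left (by omega)]

theorem foldl_min_le (f : Int → Int) (l : List Int) (v : Int) :
    l.foldl (fun a x => min a (f x)) v ≤ v := by
  induction l generalizing v with
  | nil => simp
  | cons x xs ih =>
    simp only [List.foldl_cons]
    exact le_trans (ih (min v (f x))) (min_le_left _ _)

-- The first element whose load equals the fold's minimum is exactly B's best-so-far.
theorem find_first_min (f : Int → Int) (rest : List Int) (m : Int) :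
    (m :: rest).find?
        (fun x => f x == (rest.foldl (fun (s : Int × Int) x => if f x < s.2 then (x, f x) else s) (m, f m)).2)
      = some (rest.foldl (fun (s : Int × Int) x => if f x < s.2 then (x, f x) else s) (m, f m)).1 := by
  induction rest generalizing m with
  | nil => simp [List.find?]
  | cons x xs ih =>
    simp only [List.foldl_cons]
    by_cases h : f x < f m
    · rw [if_pos h]
      have hle : (xs.foldl (fun (s : Int × Int) x => if f x < s.2 then (x, f x) else s) (x, f x)).2 ≤ f x := by
        rw [fold_snd_eq_min]; exact foldl_min_le f xs (f x)
      have hne : (f m == (xs.foldl (fun (s : Int × Int) x => if f x < s.2 then (x, f x) else s) (x, f x)).2) = false := by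
        simp only [beq_eq_false_iff_ne, ne_eq]; omega
      rw [List.find?_cons, hne]
      exact ih x
    · rw [if_neg h]
      have ihm := ih m
      by_cases hm : f m = (xs.foldl (fun (s : Int × Int) x => if f x < s.2 then (x, f x) else s) (m, f m)).2
      · have hb : (f m == (xs.foldl (fun (s : Int × Int) x => if f x < s.2 then (x, f x) else s) (m, f m)).2) = true := by
          simpa using hm
        rw [List.find?_cons, hb] at ihm ⊢
        exact ihm
      · have hle : (xs.foldl (fun (s : Int × Int) x => if f x < s.2 then (x, f x) else s) (m, f m)).2 ≤ f m := by
          rw [fold_snd_eq_min]; exact foldl_min_le f xs (f m)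
        have hbm : (f m == (xs.foldl (fun (s : Int × Int) x => if f x < s.2 then (x, f x) else s) (m, f m)).2) = false := by
          simpa using hm
        have hbx : (f x == (xs.foldl (fun (s : Int × Int) x => if f x < s.2 then (x, f x) else s) (m, f m)).2) = false := by
          simp only [beq_eq_false_iff_ne, ne_eq]; omega
        rw [List.find?_cons, hbm] at ihm
        rw [List.find?_cons, hbm, List.find?_cons, hbx]
        exact ihm

-- ===== VERDICT (by name: the statement is the Claim_ definition above) =====
theorem pick_manager_id_spec : Claim_equal_pick_manager_id := by
  intro manager_ids loads _
  unfold Spec_pick_manager_id pick_manager_id pick_manager_id_alt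
  match manager_ids with
  | [] => rfl
  | m :: rest =>
    simp only
    rw [← fold_snd_eq_min (pvLoad loads) rest m (pvLoad loads m)]
    rw [find_first_min (pvLoad loads) rest m]
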